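-- pv_equiv track=rewrite | github.com/seokhwandan/TIL | algorithm/0405/1233_사칙연산검사.py | check
-- ===== SOURCE A (Python) =====
-- def check(arr):
--     m = len(arr) // 2
--     for i in range(m):
--         if arr[i * 2] in '+-*/':
--             return 0
--         if arr[i * 2 + 1] not in '+-*/':
--             return 0
--     return 1
-- ===== SOURCE B (Python) =====
-- def check(arr):
--     OPS = '+-*/'
--     rest = arr
--     while len(rest) >= 2:
--         if rest[0] in OPS or rest[1] not in OPS:
--             return 0
--         rest = rest[2:]
--     return 1
-- ===== Notes on version B (the rewrite author's own statement) =====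
-- stated objective: simpler
-- what changed: Replaces the index-arithmetic loop over range(len(arr)//2) with direct structural consumption of the list two elements at a time (rest[0], rest[1], rest = rest[2:]), with no index computation or m.
import Mathlib
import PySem

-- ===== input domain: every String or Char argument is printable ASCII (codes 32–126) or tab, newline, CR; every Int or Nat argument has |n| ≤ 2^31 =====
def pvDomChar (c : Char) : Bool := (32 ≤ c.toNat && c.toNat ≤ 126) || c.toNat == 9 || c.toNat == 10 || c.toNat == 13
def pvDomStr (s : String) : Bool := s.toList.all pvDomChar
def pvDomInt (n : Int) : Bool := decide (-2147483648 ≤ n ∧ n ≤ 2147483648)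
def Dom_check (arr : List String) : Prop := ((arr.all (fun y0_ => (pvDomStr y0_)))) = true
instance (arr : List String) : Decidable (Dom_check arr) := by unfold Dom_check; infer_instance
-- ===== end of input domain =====

-- B consumes the list structurally two elements at a time instead of A's index loop over range(len//2); objective: simpler.


-- ===== PORT A =====
-- the 'for i in range(m)' loop with early return, over the list of loop indices
def checkLoopA (arr : List String) : List Int → Int
  | [] => 1
  | i :: rest =>
    if PySem.Str.isIn (PySem.List.pyGetD arr (i * 2) "") "+-*/" then 0
    else if !(PySem.Str.isIn (PySem.List.pyGetD arr (i * 2 + 1) "") "+-*/") then 0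
    else checkLoopA arr rest

def check (arr : List String) : Int :=
  checkLoopA arr (PySem.List.pyRange 0 (PySem.Int.floordiv (PySem.List.len arr) 2) 1)

-- ===== PORT B =====
-- the 'while len(rest) >= 2' loop: look at rest[0], rest[1], continue with rest[2:]
def check_alt (arr : List String) : Int :=
  match arr with
  | x :: op :: rest =>
    if PySem.Str.isIn x "+-*/" || !(PySem.Str.isIn op "+-*/") then 0
    else check_alt rest
  | _ => 1

-- ===== PRECONDITION & SPEC =====
def Spec_check (arr : List String) (out : Int) : Prop := out = check_alt arr
instance (arr : List String) (out : Int) : Decidable (Spec_check arr out) := by unfold Spec_check; infer_instance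

-- ===== CLAIM (what is proved, stated in full; the proofs are below) =====
def Claim_equal_check : Prop := ∀ (arr : List String), Dom_check arr → Spec_check arr (check arr)

-- ===== LEMMAS AND PROOFS =====

lemma loopA_eq : ∀ (n : Nat) (rest arr : List String) (j : Nat), rest.length ≤ n →
    arr.drop (2 * j) = rest →
    checkLoopA arr (PySem.List.pyRange (j : Int) ((j : Int) + ((rest.length / 2 : Nat) : Int)) 1)
      = check_alt rest := by
  intro n
  induction n with
  | zero =>
    intro rest arr j hle _
    have : rest = [] := by
      cases rest with | nil => rfl | cons a t => simp at hle
    subst this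
    rw [show ((j : Int) + (([].length / 2 : Nat) : Int)) = (j : Int) by simp,
        PySem.List.pyRange_one_eq_nil (by omega)]
    rfl
  | succ n ih =>
    intro rest arr j hle hdrop
    match rest with
    | [] =>
      rw [show ((j : Int) + (([].length / 2 : Nat) : Int)) = (j : Int) by simp,
          PySem.List.pyRange_one_eq_nil (by omega)]
      rfl
    | [x] =>
      rw [show ((j : Int) + (([x].length / 2 : Nat) : Int)) = (j : Int) by simp,
          PySem.List.pyRange_one_eq_nil (by omega)]
      rfl
    | x :: op :: rest' =>
      have hx : PySem.List.pyGetD arr ((j : Int) * 2) "" = x := by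
        have h0 : arr[2 * j]? = some x := by
          have := List.getElem?_drop (xs := arr) (i := 2 * j) (j := 0)
          rw [hdrop] at this; simpa using this.symm
        have h2 : ((j : Int) * 2) = ((2 * j : Nat) : Int) := by push_cast; ring
        rw [h2, PySem.List.pyGetD_natCast]
        simp [List.getD, h0]
      have hop : PySem.List.pyGetD arr ((j : Int) * 2 + 1) "" = op := by
        have h0 : arr[2 * j + 1]? = some op := by
          have := List.getElem?_drop (xs := arr) (i := 2 * j) (j := 1)
          rw [hdrop] at this; simpa using this.symm
        have h2 : ((j : Int) * 2 + 1) = ((2 * j + 1 : Nat) : Int) := by push_cast; ring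
        rw [h2, PySem.List.pyGetD_natCast]
        simp [List.getD, h0]
      have hlen : ((x :: op :: rest').length / 2 : Nat) = rest'.length / 2 + 1 := by
        simp [List.length_cons]; omega
      have hdrop' : arr.drop (2 * (j + 1)) = rest' := by
        have h0 : (arr.drop (2 * j)).drop 2 = rest' := by rw [hdrop]; simp
        rw [List.drop_drop] at h0
        rw [show 2 * (j + 1) = 2 * j + 2 by omega]; exact h0
      have htail : checkLoopA arr
          (PySem.List.pyRange ((j : Int) + 1) ((j : Int) + ((rest'.length / 2 + 1 : Nat) : Int)) 1)
          = check_alt rest' := by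
        have harg1 : ((j : Int) + 1) = (((j + 1 : Nat)) : Int) := by push_cast; ring
        have harg2 : ((j : Int) + ((rest'.length / 2 + 1 : Nat) : Int))
            = (((j + 1 : Nat)) : Int) + ((rest'.length / 2 : Nat) : Int) := by push_cast; ring
        rw [harg1, harg2]
        exact ih rest' arr (j + 1) (by simp at hle; omega) hdrop'
      have hcons : PySem.List.pyRange (j : Int) ((j : Int) + ((rest'.length / 2 + 1 : Nat) : Int)) 1
          = (j : Int) :: PySem.List.pyRange ((j : Int) + 1) ((j : Int) + ((rest'.length / 2 + 1 : Nat) : Int)) 1 := by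
        apply PySem.List.pyRange_one_cons; push_cast; omega
      rw [hlen, hcons]
      show (if PySem.Str.isIn (PySem.List.pyGetD arr ((j : Int) * 2) "") "+-*/" then (0 : Int)
            else if !(PySem.Str.isIn (PySem.List.pyGetD arr ((j : Int) * 2 + 1) "") "+-*/") then 0
            else checkLoopA arr (PySem.List.pyRange ((j : Int) + 1) ((j : Int) + ((rest'.length / 2 + 1 : Nat) : Int)) 1))
          = check_alt (x :: op :: rest')
      rw [hx, hop]
      show _ = (if PySem.Str.isIn x "+-*/" || !(PySem.Str.isIn op "+-*/") then (0 : Int)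
                else check_alt rest')
      cases hb1 : PySem.Str.isIn x "+-*/" <;> cases hb2 : PySem.Str.isIn op "+-*/" <;>
        simp only [hb1, hb2, Bool.not_true, Bool.not_false, Bool.false_or,
          Bool.or_true, Bool.or_false, Bool.false_eq_true] <;>
        first | rfl | exact htail

-- ===== VERDICT (by name: the statement is the Claim_ definition above) =====
theorem check_spec : Claim_equal_check := by
  intro arr _
  show check arr = check_alt arr
  unfold check
  have hm : PySem.Int.floordiv (PySem.List.len arr) 2 = ((arr.length / 2 : Nat) : Int) := by
    rw [PySem.List.len_eq]
    exact_mod_cast PySem.Int.floordiv_natCast arr.length 2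
  rw [hm, show ((arr.length / 2 : Nat) : Int) = ((0 : Nat) : Int) + ((arr.length / 2 : Nat) : Int) by simp]
  exact loopA_eq arr.length arr arr 0 le_rfl (by simp)
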